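-- pv_equiv track=rewrite | github.com/akinivors/thesis-dynamic-search | experiments/thesis_final/run_ultra_detailed_comparison.py | analyze_result_overlap
-- ===== SOURCE A (Python) =====
-- def analyze_result_overlap(bitmap_ids, post_old_ids, post_fixed_ids):
--     """Analyze which results overlap between methods"""
--     set_bitmap = set([i for i in bitmap_ids if i != -1])
--     set_old = set([i for i in post_old_ids if i != -1])
--     set_fixed = set([i for i in post_fixed_ids if i != -1])
--
--     return {
--         'all_three': len(set_bitmap & set_old & set_fixed),
--         'bitmap_and_old': len(set_bitmap & set_old),
--         'bitmap_and_fixed': len(set_bitmap & set_fixed),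
--         'old_and_fixed': len(set_old & set_fixed),
--         'bitmap_only': len(set_bitmap - set_old - set_fixed),
--         'old_only': len(set_old - set_bitmap - set_fixed),
--         'fixed_only': len(set_fixed - set_bitmap - set_old),
--         'total_unique': len(set_bitmap | set_old | set_fixed)
--     }
-- ===== SOURCE B (Python) =====
-- def analyze_result_overlap(bitmap_ids, post_old_ids, post_fixed_ids):
--     """Analyze which results overlap between methods (single classifying pass)."""
--     set_bitmap = set(i for i in bitmap_ids if i != -1)
--     set_old = set(i for i in post_old_ids if i != -1)
--     set_fixed = set(i for i in post_fixed_ids if i != -1)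
--
--     # one pass over the union: bucket each id by its membership pattern
--     c111 = c110 = c101 = c011 = c100 = c010 = c001 = 0
--     for x in set_bitmap | set_old | set_fixed:
--         b, o, f = x in set_bitmap, x in set_old, x in set_fixed
--         if b and o and f:
--             c111 += 1
--         elif b and o:
--             c110 += 1
--         elif b and f:
--             c101 += 1
--         elif o and f:
--             c011 += 1
--         elif b:
--             c100 += 1
--         elif o:
--             c010 += 1
--         else:
--             c001 += 1
--
--     return {
--         'all_three': c111,
--         'bitmap_and_old': c111 + c110,
--         'bitmap_and_fixed': c111 + c101,
--         'old_and_fixed': c111 + c011,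
--         'bitmap_only': c100,
--         'old_only': c010,
--         'fixed_only': c001,
--         'total_unique': c111 + c110 + c101 + c011 + c100 + c010 + c001,
--     }
-- ===== Notes on version B (the rewrite author's own statement) =====
-- stated objective: alternative
-- what changed: Replaces eight separate set-algebra expressions (each rescanning the sets) by one classifying pass over the union that buckets every id by its membership triple and derives all eight fields from the seven bucket counters.
import Mathlib
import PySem

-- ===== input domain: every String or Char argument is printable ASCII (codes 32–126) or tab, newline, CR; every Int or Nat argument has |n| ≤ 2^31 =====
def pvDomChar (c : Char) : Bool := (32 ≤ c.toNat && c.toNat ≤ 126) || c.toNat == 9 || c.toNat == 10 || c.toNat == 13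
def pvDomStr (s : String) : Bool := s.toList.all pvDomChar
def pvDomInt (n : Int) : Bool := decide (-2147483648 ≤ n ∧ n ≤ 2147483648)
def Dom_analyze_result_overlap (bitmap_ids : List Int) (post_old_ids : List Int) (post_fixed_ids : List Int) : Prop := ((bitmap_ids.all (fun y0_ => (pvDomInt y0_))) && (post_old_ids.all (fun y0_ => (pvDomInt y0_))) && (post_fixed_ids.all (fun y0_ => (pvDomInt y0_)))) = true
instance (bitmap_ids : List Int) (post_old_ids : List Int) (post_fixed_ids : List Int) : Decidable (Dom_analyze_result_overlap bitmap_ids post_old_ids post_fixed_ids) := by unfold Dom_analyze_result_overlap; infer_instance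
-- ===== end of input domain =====

-- B replaces A's eight separate set-algebra expressions by a single classifying pass over the
-- union that buckets each id by its membership triple (objective: alternative decomposition).

-- ===== PORT A =====
def analyze_result_overlap (bitmap_ids : List Int) (post_old_ids : List Int) (post_fixed_ids : List Int) : List (String × Int) :=
  let set_bitmap : PySem.Set Int := PySem.Set.ofList (bitmap_ids.filter (fun i => i != -1))
  let set_old : PySem.Set Int := PySem.Set.ofList (post_old_ids.filter (fun i => i != -1))
  let set_fixed : PySem.Set Int := PySem.Set.ofList (post_fixed_ids.filter (fun i => i != -1))
  [("all_three", ((PySem.Set.inter (PySem.Set.inter set_bitmap set_old) set_fixed).length : Int)),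
   ("bitmap_and_old", ((PySem.Set.inter set_bitmap set_old).length : Int)),
   ("bitmap_and_fixed", ((PySem.Set.inter set_bitmap set_fixed).length : Int)),
   ("old_and_fixed", ((PySem.Set.inter set_old set_fixed).length : Int)),
   ("bitmap_only", ((PySem.Set.diff (PySem.Set.diff set_bitmap set_old) set_fixed).length : Int)),
   ("old_only", ((PySem.Set.diff (PySem.Set.diff set_old set_bitmap) set_fixed).length : Int)),
   ("fixed_only", ((PySem.Set.diff (PySem.Set.diff set_fixed set_bitmap) set_old).length : Int)),
   ("total_unique", ((PySem.Set.union (PySem.Set.union set_bitmap set_old) set_fixed).length : Int))]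

-- ===== PORT B =====
-- the loop body of Source B: bump the counter of x's membership pattern (if/elif chain)
def pvStep (sb so sf : PySem.Set Int) (c : Int × Int × Int × Int × Int × Int × Int) (x : Int) :
    Int × Int × Int × Int × Int × Int × Int :=
  let b := PySem.Set.contains sb x
  let o := PySem.Set.contains so x
  let f := PySem.Set.contains sf x
  if b && o && f then (c.1 + 1, c.2.1, c.2.2.1, c.2.2.2.1, c.2.2.2.2.1, c.2.2.2.2.2.1, c.2.2.2.2.2.2)
  else if b && o then (c.1, c.2.1 + 1, c.2.2.1, c.2.2.2.1, c.2.2.2.2.1, c.2.2.2.2.2.1, c.2.2.2.2.2.2)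
  else if b && f then (c.1, c.2.1, c.2.2.1 + 1, c.2.2.2.1, c.2.2.2.2.1, c.2.2.2.2.2.1, c.2.2.2.2.2.2)
  else if o && f then (c.1, c.2.1, c.2.2.1, c.2.2.2.1 + 1, c.2.2.2.2.1, c.2.2.2.2.2.1, c.2.2.2.2.2.2)
  else if b then (c.1, c.2.1, c.2.2.1, c.2.2.2.1, c.2.2.2.2.1 + 1, c.2.2.2.2.2.1, c.2.2.2.2.2.2)
  else if o then (c.1, c.2.1, c.2.2.1, c.2.2.2.1, c.2.2.2.2.1, c.2.2.2.2.2.1 + 1, c.2.2.2.2.2.2)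
  else (c.1, c.2.1, c.2.2.1, c.2.2.2.1, c.2.2.2.2.1, c.2.2.2.2.2.1, c.2.2.2.2.2.2 + 1)

def analyze_result_overlap_alt (bitmap_ids : List Int) (post_old_ids : List Int) (post_fixed_ids : List Int) : List (String × Int) :=
  let set_bitmap : PySem.Set Int := PySem.Set.ofList (bitmap_ids.filter (fun i => i != -1))
  let set_old : PySem.Set Int := PySem.Set.ofList (post_old_ids.filter (fun i => i != -1))
  let set_fixed : PySem.Set Int := PySem.Set.ofList (post_fixed_ids.filter (fun i => i != -1))
  let u := PySem.Set.union (PySem.Set.union set_bitmap set_old) set_fixed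
  let c := u.foldl (pvStep set_bitmap set_old set_fixed) (0, 0, 0, 0, 0, 0, 0)
  [("all_three", c.1),
   ("bitmap_and_old", c.1 + c.2.1),
   ("bitmap_and_fixed", c.1 + c.2.2.1),
   ("old_and_fixed", c.1 + c.2.2.2.1),
   ("bitmap_only", c.2.2.2.2.1),
   ("old_only", c.2.2.2.2.2.1),
   ("fixed_only", c.2.2.2.2.2.2),
   ("total_unique", c.1 + c.2.1 + c.2.2.1 + c.2.2.2.1 + c.2.2.2.2.1 + c.2.2.2.2.2.1 + c.2.2.2.2.2.2)]

-- ===== PRECONDITION & SPEC =====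
def Spec_analyze_result_overlap (bitmap_ids : List Int) (post_old_ids : List Int) (post_fixed_ids : List Int) (out : List (String × Int)) : Prop := out = analyze_result_overlap_alt bitmap_ids post_old_ids post_fixed_ids
instance (bitmap_ids : List Int) (post_old_ids : List Int) (post_fixed_ids : List Int) (out : List (String × Int)) : Decidable (Spec_analyze_result_overlap bitmap_ids post_old_ids post_fixed_ids out) := by unfold Spec_analyze_result_overlap; infer_instance

-- ===== CLAIM (what is proved, stated in full; the proofs are below) =====
def Claim_equal_analyze_result_overlap : Prop := ∀ (bitmap_ids : List Int) (post_old_ids : List Int) (post_fixed_ids : List Int), Dom_analyze_result_overlap bitmap_ids post_old_ids post_fixed_ids → Spec_analyze_result_overlap bitmap_ids post_old_ids post_fixed_ids (analyze_result_overlap bitmap_ids post_old_ids post_fixed_ids)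

-- ===== LEMMAS AND PROOFS =====

-- the classifying fold computes the seven membership-pattern counts of the traversed list
theorem foldl_pvStep (sb so sf : PySem.Set Int) (u : List Int) :
    ∀ acc : Int × Int × Int × Int × Int × Int × Int,
    u.foldl (pvStep sb so sf) acc =
      (acc.1 + (u.countP (fun x => PySem.Set.contains sb x && PySem.Set.contains so x && PySem.Set.contains sf x) : Int),
       acc.2.1 + (u.countP (fun x => PySem.Set.contains sb x && PySem.Set.contains so x && !PySem.Set.contains sf x) : Int),
       acc.2.2.1 + (u.countP (fun x => PySem.Set.contains sb x && !PySem.Set.contains so x && PySem.Set.contains sf x) : Int),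
       acc.2.2.2.1 + (u.countP (fun x => !PySem.Set.contains sb x && PySem.Set.contains so x && PySem.Set.contains sf x) : Int),
       acc.2.2.2.2.1 + (u.countP (fun x => PySem.Set.contains sb x && !PySem.Set.contains so x && !PySem.Set.contains sf x) : Int),
       acc.2.2.2.2.2.1 + (u.countP (fun x => !PySem.Set.contains sb x && PySem.Set.contains so x && !PySem.Set.contains sf x) : Int),
       acc.2.2.2.2.2.2 + (u.countP (fun x => !PySem.Set.contains sb x && !PySem.Set.contains so x) : Int)) := by
  induction u with
  | nil => intro acc; simp
  | cons x t ih =>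
    intro acc
    rw [List.foldl_cons, ih]
    simp only [pvStep, List.countP_cons]
    cases hb : PySem.Set.contains sb x <;> cases ho : PySem.Set.contains so x <;>
      cases hf : PySem.Set.contains sf x <;> simp [Prod.ext_iff] <;> omega

-- splitting the pairwise/total counts into the pattern buckets, over a list covered by the three sets
theorem countP_buckets (sb so sf : PySem.Set Int) (l : List Int)
    (hl : ∀ x ∈ l, PySem.Set.contains sb x || PySem.Set.contains so x || PySem.Set.contains sf x) :
    l.countP (fun x => PySem.Set.contains sb x && PySem.Set.contains so x)
        = l.countP (fun x => PySem.Set.contains sb x && PySem.Set.contains so x && PySem.Set.contains sf x)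
          + l.countP (fun x => PySem.Set.contains sb x && PySem.Set.contains so x && !PySem.Set.contains sf x)
    ∧ l.countP (fun x => PySem.Set.contains sb x && PySem.Set.contains sf x)
        = l.countP (fun x => PySem.Set.contains sb x && PySem.Set.contains so x && PySem.Set.contains sf x)
          + l.countP (fun x => PySem.Set.contains sb x && !PySem.Set.contains so x && PySem.Set.contains sf x)
    ∧ l.countP (fun x => PySem.Set.contains so x && PySem.Set.contains sf x)
        = l.countP (fun x => PySem.Set.contains sb x && PySem.Set.contains so x && PySem.Set.contains sf x)
          + l.countP (fun x => !PySem.Set.contains sb x && PySem.Set.contains so x && PySem.Set.contains sf x)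
    ∧ l.length
        = l.countP (fun x => PySem.Set.contains sb x && PySem.Set.contains so x && PySem.Set.contains sf x)
          + l.countP (fun x => PySem.Set.contains sb x && PySem.Set.contains so x && !PySem.Set.contains sf x)
          + l.countP (fun x => PySem.Set.contains sb x && !PySem.Set.contains so x && PySem.Set.contains sf x)
          + l.countP (fun x => !PySem.Set.contains sb x && PySem.Set.contains so x && PySem.Set.contains sf x)
          + l.countP (fun x => PySem.Set.contains sb x && !PySem.Set.contains so x && !PySem.Set.contains sf x)
          + l.countP (fun x => !PySem.Set.contains sb x && PySem.Set.contains so x && !PySem.Set.contains sf x)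
          + l.countP (fun x => !PySem.Set.contains sb x && !PySem.Set.contains so x) := by
  induction l with
  | nil => simp
  | cons x t ih =>
    have hx := hl x (List.mem_cons_self)
    obtain ⟨h1, h2, h3, h4⟩ := ih (fun y hy => hl y (List.mem_cons_of_mem x hy))
    simp only [List.countP_cons, List.length_cons]
    cases hb : PySem.Set.contains sb x <;> cases ho : PySem.Set.contains so x <;>
      cases hf : PySem.Set.contains sf x <;> simp_all <;> omega

-- two nodup lists with matching filtered membership have equal counts
theorem countP_eq_of_mem_iff (p q : Int → Bool) (xs ys : List Int)
    (hx : xs.Nodup) (hy : ys.Nodup)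
    (h : ∀ a, (a ∈ xs ∧ p a = true) ↔ (a ∈ ys ∧ q a = true)) :
    xs.countP p = ys.countP q := by
  rw [List.countP_eq_length_filter, List.countP_eq_length_filter]
  apply List.Perm.length_eq
  rw [List.perm_ext_iff_of_nodup (hx.filter _) (hy.filter _)]
  intro a
  simp only [List.mem_filter]
  exact h a

-- length of a nodup list as a count over a covering nodup list
theorem length_eq_countP (q : Int → Bool) (xs ys : List Int)
    (hx : xs.Nodup) (hy : ys.Nodup)
    (h : ∀ a, a ∈ xs ↔ (a ∈ ys ∧ q a = true)) :
    xs.length = ys.countP q := by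
  have := countP_eq_of_mem_iff (fun _ => true) q xs ys hx hy (by
    intro a; constructor
    · rintro ⟨ha, -⟩; exact (h a).1 ha
    · intro ha; exact ⟨(h a).2 ha, rfl⟩)
  rw [← this]
  simp

-- ===== VERDICT (by name: the statement is the Claim_ definition above) =====
theorem analyze_result_overlap_spec : Claim_equal_analyze_result_overlap := by
  intro bs os fs _
  unfold Spec_analyze_result_overlap
  dsimp only [analyze_result_overlap, analyze_result_overlap_alt]
  rw [foldl_pvStep]
  set sb : PySem.Set Int := PySem.Set.ofList (bs.filter (fun i => i != -1)) with hsb_def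
  set so : PySem.Set Int := PySem.Set.ofList (os.filter (fun i => i != -1)) with hso_def
  set sf : PySem.Set Int := PySem.Set.ofList (fs.filter (fun i => i != -1)) with hsf_def
  have hsb : sb.Nodup := PySem.Set.nodup_ofList _
  have hso : so.Nodup := PySem.Set.nodup_ofList _
  have hsf : sf.Nodup := PySem.Set.nodup_ofList _
  set u : PySem.Set Int := PySem.Set.union (PySem.Set.union sb so) sf with hu_def
  have hu : u.Nodup := PySem.Set.nodup_union _ _ (PySem.Set.nodup_union _ _ hsb)
  have hmemU : ∀ a : Int, a ∈ u ↔ (a ∈ sb ∨ a ∈ so ∨ a ∈ sf) := by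
    intro a
    rw [hu_def, PySem.Set.mem_union, PySem.Set.mem_union]
    tauto
  have hcov : ∀ x ∈ u, PySem.Set.contains sb x || PySem.Set.contains so x || PySem.Set.contains sf x := by
    intro x hx
    have := (hmemU x).1 hx
    simp only [Bool.or_eq_true, PySem.Set.contains_iff]
    tauto
  obtain ⟨h1, h2, h3, h4⟩ := countP_buckets sb so sf u hcov
  have e111 : (PySem.Set.inter (PySem.Set.inter sb so) sf).length
      = u.countP (fun x => PySem.Set.contains sb x && PySem.Set.contains so x && PySem.Set.contains sf x) :=
    length_eq_countP _ _ u (PySem.Set.nodup_inter _ _ (PySem.Set.nodup_inter _ _ hsb)) hu (by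
      intro a
      simp [PySem.Set.mem_inter, hmemU]
      tauto)
  have ebo : (PySem.Set.inter sb so).length = u.countP (fun x => PySem.Set.contains sb x && PySem.Set.contains so x) :=
    length_eq_countP _ _ u (PySem.Set.nodup_inter _ _ hsb) hu (by
      intro a
      simp [PySem.Set.mem_inter, hmemU]
      tauto)
  have ebf : (PySem.Set.inter sb sf).length = u.countP (fun x => PySem.Set.contains sb x && PySem.Set.contains sf x) :=
    length_eq_countP _ _ u (PySem.Set.nodup_inter _ _ hsb) hu (by
      intro a
      simp [PySem.Set.mem_inter, hmemU]
      tauto)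
  have eof : (PySem.Set.inter so sf).length = u.countP (fun x => PySem.Set.contains so x && PySem.Set.contains sf x) :=
    length_eq_countP _ _ u (PySem.Set.nodup_inter _ _ hso) hu (by
      intro a
      simp [PySem.Set.mem_inter, hmemU]
      tauto)
  have e100 : (PySem.Set.diff (PySem.Set.diff sb so) sf).length
      = u.countP (fun x => PySem.Set.contains sb x && !PySem.Set.contains so x && !PySem.Set.contains sf x) :=
    length_eq_countP _ _ u (PySem.Set.nodup_diff _ _ (PySem.Set.nodup_diff _ _ hsb)) hu (by
      intro a
      simp [PySem.Set.mem_diff, hmemU]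
      tauto)
  have e010 : (PySem.Set.diff (PySem.Set.diff so sb) sf).length
      = u.countP (fun x => !PySem.Set.contains sb x && PySem.Set.contains so x && !PySem.Set.contains sf x) :=
    length_eq_countP _ _ u (PySem.Set.nodup_diff _ _ (PySem.Set.nodup_diff _ _ hso)) hu (by
      intro a
      simp [PySem.Set.mem_diff, hmemU]
      tauto)
  have e001 : (PySem.Set.diff (PySem.Set.diff sf sb) so).length
      = u.countP (fun x => !PySem.Set.contains sb x && !PySem.Set.contains so x) :=
    length_eq_countP _ _ u (PySem.Set.nodup_diff _ _ (PySem.Set.nodup_diff _ _ hsf)) hu (by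
      intro a
      simp [PySem.Set.mem_diff, hmemU]
      tauto)
  simp only [List.cons.injEq, Prod.mk.injEq, zero_add, and_true, true_and]
  refine ⟨?_, ?_, ?_, ?_, ?_, ?_, ?_, ?_⟩
  · rw [e111]
  · rw [ebo, h1]
    push_cast
    ring
  · rw [ebf, h2]
    push_cast
    ring
  · rw [eof, h3]
    push_cast
    ring
  · rw [e100]
  · rw [e010]
  · rw [e001]
  · rw [h4]
    push_cast
    ring
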